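-- pv_equiv track=rewrite | github.com/Qenszu/workshop | python/WDI/zestaw_5/159.py | rek
-- ===== SOURCE A (Python) =====
-- def Is_Prime(n):
--     if n < 2:
--         return False
--     if n == 2:
--         return True
--     if n%2 == 0:
--         return False
--     i = 3
--     while i*i <= n:
--         if n%i == 0:
--             return False
--         i += 1
--
--     return True
--
-- def rek(A, B, liczba = 0, m = 1):
--     if A == 1 and B == 0:
--         liczba += m
--         if not Is_Prime(liczba):
--             return 1
--         else:
--             return 0
--     result = 0
--
--     if B > 0:
--         result += rek(A, B - 1, liczba, m*2)
--     if A > 1: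
--         result += rek(A-1, B, liczba + m, m*2)
--
--     return result
-- ===== SOURCE B (Python) =====
-- # B: instead of A's accumulator recursion on (A, B) threading (liczba, m), build the
-- # candidate set explicitly: the numbers counted are liczba + m*(2**(A+B-1) + x) where x
-- # ranges over the sums of 2**p for (A-1)-element subsets of the low A+B-1 bit positions
-- # (the top bit is forced to 1); _subset_sums produces that list by Pascal splitting on
-- # bit 0, and rek is one counting pass over it with the unchanged Is_Prime.
-- def Is_Prime(n):
--     if n < 2:
--         return False
--     if n == 2:
--         return True
--     if n%2 == 0:
--         return False
--     i = 3
--     while i*i <= n: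
--         if n%i == 0:
--             return False
--         i += 1
--
--     return True
--
-- def _subset_sums(n, k):
--     # sums of 2**p over all k-element subsets of range(n), split on whether bit 0 is set
--     if k == 0:
--         return [0]
--     if k > n:
--         return []
--     return [2 * x for x in _subset_sums(n - 1, k)] + [1 + 2 * x for x in _subset_sums(n - 1, k - 1)]
--
-- def rek(A, B, liczba=0, m=1):
--     if A < 1 or B < 0:
--         return 0
--     top = 2 ** (A + B - 1)
--     cnt = 0
--     for x in _subset_sums(A + B - 1, A - 1):
--         if not Is_Prime(liczba + m * (top + x)):
--             cnt += 1
--     return cnt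
-- ===== Notes on version B (the rewrite author's own statement) =====
-- stated objective: alternative
-- what changed: Replaces A's accumulator recursion on (A,B) that threads (liczba,m) downward by an explicit construction of the candidate set: a Pascal-style list of the subset sums of powers of two for the A-1 lower one-bits, followed by a single counting pass with the unchanged Is_Prime; Pre_ excludes only the deep-recursion inputs on which CPython's A raises RecursionError (recursion depth A+B, resp. B or A on the degenerate sides, against the runner's 10000-frame limit).
-- outside the precondition, e.g. on rek(0, 9950, 0, 1): A returns 0, B returns 0
import Mathlib
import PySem

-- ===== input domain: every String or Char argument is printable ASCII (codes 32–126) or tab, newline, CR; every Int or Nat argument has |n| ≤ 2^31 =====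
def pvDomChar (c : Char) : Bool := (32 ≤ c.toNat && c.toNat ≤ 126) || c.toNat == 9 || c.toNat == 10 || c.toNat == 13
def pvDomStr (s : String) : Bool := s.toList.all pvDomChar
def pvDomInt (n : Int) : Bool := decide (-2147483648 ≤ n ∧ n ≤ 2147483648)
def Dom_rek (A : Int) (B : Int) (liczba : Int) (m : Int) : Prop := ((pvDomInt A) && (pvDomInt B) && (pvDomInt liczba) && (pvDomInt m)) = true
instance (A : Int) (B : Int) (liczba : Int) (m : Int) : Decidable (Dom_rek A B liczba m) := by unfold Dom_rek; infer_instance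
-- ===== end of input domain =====

-- B replaces A's accumulator recursion on (A,B) threading (liczba, m) by an explicit
-- construction of the candidate set (Pascal-style subset sums of powers of two) followed
-- by one counting pass with the same Is_Prime (objective: alternative, same cost).
-- A's recursion is implemented by structural recursion on a fuel argument that is a
-- proven upper bound on its depth, so the port computes exactly what its Python computes.

-- ===== PORT A =====
-- shared helper Is_Prime (identical source text in Source A and Source B)
-- 'i = 3; while i*i <= n: ...' ; i*i ≤ n forces i ≤ n, so n.toNat + 1 fuel never runs out
def pyIsPrimeLoop (n : Int) : Nat → Int → Bool
  | 0, _ => true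
  | fuel + 1, i =>
    if i * i ≤ n then
      (if n % i = 0 then false else pyIsPrimeLoop n fuel (i + 1))
    else true

def Is_Prime (n : Int) : Bool :=
  if n < 2 then false
  else if n = 2 then true
  else if n % 2 = 0 then false
  else pyIsPrimeLoop n (n.toNat + 1) 3

-- each recursive call decreases A.toNat + B.toNat, so that sum bounds the depth
def rekFuel : Nat → Int → Int → Int → Int → Int
  | 0, _, _, _, _ => 0
  | fuel + 1, A, B, liczba, m =>
    if A = 1 ∧ B = 0 then
      (if Is_Prime (liczba + m) = false then 1 else 0)
    else
      (if B > 0 then rekFuel fuel A (B - 1) liczba (m * 2) else 0)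
        + (if A > 1 then rekFuel fuel (A - 1) B (liczba + m) (m * 2) else 0)

def rek (A : Int) (B : Int) (liczba : Int) (m : Int) : Int :=
  rekFuel (A.toNat + B.toNat + 1) A B liczba m

-- ===== PORT B =====
-- helper _subset_sums: sums of 2^p over all k-element subsets of range n,
-- split on whether bit 0 is chosen (Python's branch order: k == 0 first, then n == 0)
def subsetSums : Nat → Nat → List Int
  | _, 0 => [0]
  | 0, _ + 1 => []
  | n + 1, k + 1 =>
      if k + 1 > n + 1 then []
      else
        (subsetSums n (k + 1)).map (fun x => 2 * x)
          ++ (subsetSums n k).map (fun x => 1 + 2 * x)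

-- the counting for-loop is a foldl over the list; 2 ** (A+B-1) is 2 ^ (A+B-1).toNat,
-- exact because the loop is only reached when A ≥ 1 and B ≥ 0
def rek_alt (A : Int) (B : Int) (liczba : Int) (m : Int) : Int :=
  if A < 1 ∨ B < 0 then 0
  else
    (subsetSums (A + B - 1).toNat (A - 1).toNat).foldl
      (fun cnt x =>
        if Is_Prime (liczba + m * (2 ^ (A + B - 1).toNat + x)) = false then cnt + 1 else cnt) 0

-- ===== PRECONDITION & SPEC =====
-- Pre_ excludes only the deep-recursion inputs on which CPython's A raises RecursionError:
-- A's recursion depth is A+B when A ≥ 1 and B ≥ 0 (B resp. A on the degenerate sides) and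
-- the runner's limit is 10000 frames, of which the runner's own frames use a few dozen
-- (the measured raise boundary is ≈9997); the bound 9900 is that limit minus room for
-- those frames, see the cite in claim.json for the narrow band this leaves out.
def Pre_rek (A : Int) (B : Int) (liczba : Int) (m : Int) : Prop :=
  (1 ≤ A → 0 ≤ B → A.toNat + B.toNat ≤ 9900) ∧ (A < 1 → B.toNat ≤ 9900) ∧ (B < 0 → A.toNat ≤ 9900)
instance (A : Int) (B : Int) (liczba : Int) (m : Int) : Decidable (Pre_rek A B liczba m) := by unfold Pre_rek; infer_instance

def pvWitness_rek : Int × Int × Int × Int := (3, 2, 0, 1)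

def Spec_rek (A : Int) (B : Int) (liczba : Int) (m : Int) (out : Int) : Prop := out = rek_alt A B liczba m
instance (A : Int) (B : Int) (liczba : Int) (m : Int) (out : Int) : Decidable (Spec_rek A B liczba m out) := by unfold Spec_rek; infer_instance

-- ===== CLAIM (what is proved, stated in full; the proofs are below) =====
def Claim_equal_rek : Prop := ∀ (A : Int) (B : Int) (liczba : Int) (m : Int), Dom_rek A B liczba m → Pre_rek A B liczba m → Spec_rek A B liczba m (rek A B liczba m)

-- ===== LEMMAS AND PROOFS =====

-- rekFuel does not depend on the fuel once the fuel exceeds A.toNat + B.toNat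
theorem rekFuel_congr : ∀ (f g : Nat) (A B l m : Int), A.toNat + B.toNat < f → A.toNat + B.toNat < g →
    rekFuel f A B l m = rekFuel g A B l m := by
  intro f
  induction f with
  | zero => intro g A B l m hf; omega
  | succ f' ih =>
    intro g A B l m hf hg
    obtain ⟨g', rfl⟩ : ∃ g', g = g' + 1 := ⟨g - 1, by omega⟩
    rw [rekFuel, rekFuel]
    by_cases hbase : A = 1 ∧ B = 0
    · simp [hbase]
    · rw [if_neg hbase, if_neg hbase]
      congr 1
      · by_cases hB : B > 0
        · rw [if_pos hB, if_pos hB, ih g' A (B - 1) l (m * 2) (by omega) (by omega)]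
        · rw [if_neg hB, if_neg hB]
      · by_cases hA : A > 1
        · rw [if_pos hA, if_pos hA, ih g' (A - 1) B (l + m) (m * 2) (by omega) (by omega)]
        · rw [if_neg hA, if_neg hA]

-- the one-step unfolding of rek (the Python recursion, fuel hidden)
theorem rek_eq (A B l m : Int) :
    rek A B l m =
      if A = 1 ∧ B = 0 then
        (if Is_Prime (l + m) = false then 1 else 0)
      else
        (if B > 0 then rek A (B - 1) l (m * 2) else 0)
          + (if A > 1 then rek (A - 1) B (l + m) (m * 2) else 0) := by
  rw [rek, rekFuel]
  by_cases hbase : A = 1 ∧ B = 0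
  · simp [hbase]
  · rw [if_neg hbase, if_neg hbase]
    congr 1
    · by_cases hB : B > 0
      · rw [if_pos hB, if_pos hB, rek,
          rekFuel_congr (A.toNat + B.toNat) (A.toNat + (B-1).toNat + 1) A (B - 1) l (m * 2) (by omega) (by omega)]
      · rw [if_neg hB, if_neg hB]
    · by_cases hA : A > 1
      · rw [if_pos hA, if_pos hA, rek,
          rekFuel_congr (A.toNat + B.toNat) ((A-1).toNat + B.toNat + 1) (A - 1) B (l + m) (m * 2) (by omega) (by omega)]
      · rw [if_neg hA, if_neg hA]

-- rek is 0 when A < 1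
theorem rek_zero_of_A_lt_one : ∀ (n : Nat) (A B l m : Int), B.toNat ≤ n → A < 1 → rek A B l m = 0 := by
  intro n
  induction n with
  | zero =>
    intro A B l m hB hA
    rw [rek_eq]
    simp only [show ¬(A = 1 ∧ B = 0) by omega, if_false]
    simp [show ¬ B > 0 by omega, show ¬ A > 1 by omega]
  | succ k ih =>
    intro A B l m hB hA
    rw [rek_eq]
    simp only [show ¬(A = 1 ∧ B = 0) by omega, if_false]
    by_cases hBpos : B > 0
    · simp [hBpos, show ¬ A > 1 by omega, ih A (B - 1) l (m * 2) (by omega) hA]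
    · simp [hBpos, show ¬ A > 1 by omega]

-- rek is 0 when B < 0
theorem rek_zero_of_B_neg : ∀ (n : Nat) (A B l m : Int), A.toNat ≤ n → B < 0 → rek A B l m = 0 := by
  intro n
  induction n with
  | zero =>
    intro A B l m hA hB
    rw [rek_eq]
    simp [show ¬(A = 1 ∧ B = 0) by omega, show ¬ B > 0 by omega, show ¬ A > 1 by omega]
  | succ k ih =>
    intro A B l m hA hB
    rw [rek_eq]
    simp only [show ¬(A = 1 ∧ B = 0) by omega, if_false]
    by_cases hApos : A > 1
    · simp [show ¬ B > 0 by omega, hApos, ih (A - 1) B (l + m) (m * 2) (by omega) hB]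
    · simp [show ¬ B > 0 by omega, hApos]

-- base row: rek 1 B l m counts the single number l + m * 2^B
theorem rek_one : ∀ (n : Nat) (B l m : Int), B.toNat = n → 0 ≤ B →
    rek 1 B l m = (if Is_Prime (l + m * 2 ^ B.toNat) = false then 1 else 0) := by
  intro n
  induction n with
  | zero =>
    intro B l m hB hB0
    have : B = 0 := by omega
    subst this
    rw [rek_eq]
    norm_num
  | succ k ih =>
    intro B l m hB hB0
    have hBpos : B > 0 := by omega
    rw [rek_eq, if_neg (show ¬((1:Int) = 1 ∧ B = 0) by omega), if_pos hBpos,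
      if_neg (show ¬ (1:Int) > 1 by norm_num), add_zero]
    rw [ih (B - 1) l (m * 2) (by omega) (by omega)]
    have hpow : m * 2 * 2 ^ (B - 1).toNat = m * 2 ^ B.toNat := by
      have : B.toNat = (B - 1).toNat + 1 := by omega
      rw [this, pow_succ]; ring
    rw [hpow]

-- subsetSums n k is empty once k exceeds n (no k-subset of range n exists)
theorem subsetSums_nil : ∀ (n k : Nat), n < k → subsetSums n k = [] := by
  intro n k hk
  match n, k with
  | _, 0 => omega
  | 0, _ + 1 => rfl
  | n + 1, k + 1 => rw [subsetSums, if_pos (by omega)]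

-- main invariant: A's recursion counts exactly the non-primes among
-- l + m * (2^(A+B-1) + x), x a subset sum of the A-1 lower one-bits
theorem rek_eq_countP : ∀ (fuel : Nat) (A B l m : Int), A.toNat + B.toNat ≤ fuel → 1 ≤ A → 0 ≤ B →
    rek A B l m =
      ((subsetSums (A + B - 1).toNat (A - 1).toNat).countP
        (fun x => Is_Prime (l + m * (2 ^ (A + B - 1).toNat + x)) = false) : Int) := by
  intro fuel
  induction fuel with
  | zero => intro A B l m hf hA; omega
  | succ f ih =>
    intro A B l m hf hA hB
    by_cases hA1 : A = 1
    · subst hA1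
      have h1 : ((1:Int) + B - 1).toNat = B.toNat := by omega
      have h0 : ((1:Int) - 1).toNat = 0 := by norm_num
      have hs : subsetSums B.toNat 0 = [0] := by
        cases B.toNat <;> rfl
      rw [h1, h0, hs, rek_one B.toNat B l m rfl hB, List.countP_singleton]
      by_cases h : Is_Prime (l + m * (2 ^ B.toNat + 0)) = false
      · rw [if_pos (by simpa using h), if_pos (by simpa using h)]; norm_num
      · rw [if_neg (by simpa using h), if_neg (by simpa using h)]; norm_num
    · -- A ≥ 2: unfold one level of subsetSums at (nn+1, kk+1)
      have hA2 : 2 ≤ A := by omega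
      obtain ⟨nn, hnn⟩ : ∃ nn, (A + B - 1).toNat = nn + 1 := ⟨(A + B - 1).toNat - 1, by omega⟩
      obtain ⟨kk, hkk⟩ : ∃ kk, (A - 1).toNat = kk + 1 := ⟨(A - 1).toNat - 1, by omega⟩
      have hpow : (2:Int) ^ (nn + 1) = 2 * 2 ^ nn := by rw [pow_succ]; ring
      have hskip : (if B > 0 then rek A (B - 1) l (m * 2) else 0)
          = ((subsetSums nn (kk + 1)).countP
              (fun x => Is_Prime (l + m * (2 ^ (nn + 1) + 2 * x)) = false) : Int) := by
        by_cases hBpos : B > 0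
        · rw [if_pos hBpos, ih A (B - 1) l (m * 2) (by omega) hA (by omega)]
          have hnn' : (A + (B - 1) - 1).toNat = nn := by omega
          rw [hnn', hkk]
          congr 1
          apply List.countP_congr
          intro x _
          simp only [decide_eq_true_eq]
          constructor
          · intro hx
            rw [hpow, show l + m * (2 * 2 ^ nn + 2 * x) = l + m * 2 * (2 ^ nn + x) by ring]
            exact hx
          · intro hx
            rw [hpow, show l + m * (2 * 2 ^ nn + 2 * x) = l + m * 2 * (2 ^ nn + x) by ring] at hx
            exact hx
        · rw [if_neg hBpos, subsetSums_nil nn (kk + 1) (by omega)]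
          simp
      have htake : (if A > 1 then rek (A - 1) B (l + m) (m * 2) else 0)
          = ((subsetSums nn kk).countP
              (fun x => Is_Prime (l + m * (2 ^ (nn + 1) + (1 + 2 * x))) = false) : Int) := by
        rw [if_pos (show A > 1 by omega), ih (A - 1) B (l + m) (m * 2) (by omega) (by omega) hB]
        have hnn' : (A - 1 + B - 1).toNat = nn := by omega
        have hkk' : (A - 1 - 1).toNat = kk := by omega
        rw [hnn', hkk']
        congr 1
        apply List.countP_congr
        intro x _
        simp only [decide_eq_true_eq]
        constructor
        · intro hx
          rw [hpow, show l + m * (2 * 2 ^ nn + (1 + 2 * x)) = l + m + m * 2 * (2 ^ nn + x) by ring]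
          exact hx
        · intro hx
          rw [hpow, show l + m * (2 * 2 ^ nn + (1 + 2 * x)) = l + m + m * 2 * (2 ^ nn + x) by ring] at hx
          exact hx
      rw [rek_eq, if_neg (show ¬(A = 1 ∧ B = 0) by omega), hskip, htake,
        hnn, hkk, subsetSums, if_neg (show ¬(kk + 1 > nn + 1) by omega),
        List.countP_append, List.countP_map, List.countP_map]
      simp only [Function.comp_def]
      push_cast
      rfl

-- ===== VERDICT (by name: the statement is the Claim_ definition above) =====
theorem rek_spec : Claim_equal_rek := by
  unfold Claim_equal_rek
  intro A B l m _ _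
  unfold Spec_rek rek_alt
  by_cases h : A < 1 ∨ B < 0
  · rw [if_pos h]
    rcases h with h | h
    · exact rek_zero_of_A_lt_one B.toNat A B l m le_rfl h
    · exact rek_zero_of_B_neg A.toNat A B l m le_rfl h
  · rw [if_neg h]
    rw [PySem.List.foldl_ite_add_one]
    rw [rek_eq_countP (A.toNat + B.toNat) A B l m le_rfl (by omega) (by omega)]
    norm_num
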